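-- pv_equiv track=rewrite | github.com/nickd16/SenNet-HOA-Segmentation-Competition | models/unet.py | input_dim
-- ===== SOURCE A (Python) =====
-- import math
--
-- def input_dim(output_dim, layers=4):
--     output_dim = int((output_dim-4)/(2**layers))*(2**layers)+4
--     output_dim += 4
--     for _ in range(layers):
--         output_dim = math.ceil((output_dim//2))+4
--     for _ in range(layers):
--         output_dim = (output_dim*2)+4
--     return output_dim
-- ===== SOURCE B (Python) =====
-- def input_dim(output_dim, layers=4):
--     # One closed-form expression: halving-plus-4 from a start of q*2^layers + 8
--     # keeps the constant 8, so the whole pipeline collapses to q*p + 12*p - 4.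
--     p = 2**layers
--     q = int((output_dim - 4) / p)
--     return q*p + 12*p - 4
-- ===== Notes on version B (the rewrite author's own statement) =====
-- stated objective: simpler
-- what changed: Both range-loops and the rounding preamble collapse into one closed-form arithmetic expression q*2^layers + 12*2^layers - 4, with no loops at all.
-- outside the precondition, e.g. on input_dim(10, -1): A returns 14.0, B returns 8.0
import Mathlib
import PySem

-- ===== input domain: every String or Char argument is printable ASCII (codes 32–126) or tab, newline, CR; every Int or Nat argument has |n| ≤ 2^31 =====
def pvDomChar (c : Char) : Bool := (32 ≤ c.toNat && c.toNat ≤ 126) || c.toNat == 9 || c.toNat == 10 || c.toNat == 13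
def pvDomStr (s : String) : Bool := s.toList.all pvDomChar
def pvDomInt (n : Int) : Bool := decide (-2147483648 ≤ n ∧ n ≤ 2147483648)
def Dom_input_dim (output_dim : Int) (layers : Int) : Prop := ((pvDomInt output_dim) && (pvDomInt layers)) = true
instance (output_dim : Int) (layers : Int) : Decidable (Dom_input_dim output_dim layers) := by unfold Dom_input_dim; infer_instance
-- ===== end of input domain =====

-- B replaces A's two loops and the rounding preamble by one closed-form arithmetic
-- expression (objective: simpler).

-- ===== PORT A =====
-- A's first line: int((output_dim-4)/(2**layers)) is exact float division by a power
-- of two followed by truncation toward zero on the Dom-bounded range = Int.tdiv.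
def input_dim (output_dim : Int) (layers : Int) : Int :=
  let p : Int := 2 ^ layers.toNat
  let od0 : Int := (output_dim - 4).tdiv p * p + 4
  let od1 : Int := od0 + 4
  -- for _ in range(layers): output_dim = math.ceil(output_dim//2)+4  (ceil of an int is itself)
  let od2 : Int := (List.range layers.toNat).foldl (fun x _ => PySem.Int.floordiv x 2 + 4) od1
  -- for _ in range(layers): output_dim = output_dim*2+4
  (List.range layers.toNat).foldl (fun x _ => x * 2 + 4) od2

-- ===== PORT B =====
def input_dim_alt (output_dim : Int) (layers : Int) : Int :=
  let p : Int := 2 ^ layers.toNat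
  let q : Int := (output_dim - 4).tdiv p
  q * p + 12 * p - 4

-- ===== PRECONDITION & SPEC =====
-- Pre_ excludes layers < 0: there 2**layers is a Python float, and A returns a float
-- (e.g. 14.0), not a value of the declared int type.
def Pre_input_dim (output_dim : Int) (layers : Int) : Prop := 0 ≤ layers
instance (output_dim : Int) (layers : Int) : Decidable (Pre_input_dim output_dim layers) := by unfold Pre_input_dim; infer_instance
def pvWitness_input_dim : Int × Int := (100, 4)

def Spec_input_dim (output_dim : Int) (layers : Int) (out : Int) : Prop := out = input_dim_alt output_dim layers
instance (output_dim : Int) (layers : Int) (out : Int) : Decidable (Spec_input_dim output_dim layers out) := by unfold Spec_input_dim; infer_instance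

-- ===== CLAIM (what is proved, stated in full; the proofs are below) =====
def Claim_equal_input_dim : Prop := ∀ (output_dim : Int) (layers : Int), Dom_input_dim output_dim layers → Pre_input_dim output_dim layers → Spec_input_dim output_dim layers (input_dim output_dim layers)

-- ===== LEMMAS AND PROOFS =====

-- First loop: starting from q*2^n + 8, n halve-and-add-4 steps land exactly on q + 8.
theorem foldl_half_loop (n : Nat) (q : Int) :
    (List.range n).foldl (fun x _ => PySem.Int.floordiv x 2 + 4) (q * 2 ^ n + 8) = q + 8 := by
  induction n generalizing q with
  | zero => simp
  | succ n ih =>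
    rw [List.range_succ, List.foldl_append]
    have h : q * 2 ^ (n + 1) + 8 = (2 * q) * 2 ^ n + 8 := by ring
    rw [h, ih, List.foldl_cons, List.foldl_nil,
      PySem.Int.floordiv_eq_ediv_of_pos (a := 2 * q + 8) (by omega)]
    omega

-- Second loop: n double-and-add-4 steps compute x*2^n + 4*(2^n - 1).
theorem foldl_double_loop (n : Nat) (x : Int) :
    (List.range n).foldl (fun y _ => y * 2 + 4) x = x * 2 ^ n + 4 * (2 ^ n - 1) := by
  induction n generalizing x with
  | zero => simp
  | succ n ih =>
    rw [List.range_succ, List.foldl_append, List.foldl_cons, List.foldl_nil, ih]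
    ring

-- ===== VERDICT (by name: the statement is the Claim_ definition above) =====
theorem input_dim_spec : Claim_equal_input_dim := by
  intro output_dim layers _ _
  simp only [Spec_input_dim, input_dim, input_dim_alt]
  have h1 : (output_dim - 4).tdiv (2 ^ layers.toNat) * 2 ^ layers.toNat + 4 + 4
      = (output_dim - 4).tdiv (2 ^ layers.toNat) * 2 ^ layers.toNat + 8 := by ring
  rw [h1, foldl_half_loop, foldl_double_loop]
  ring
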